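-- pv_equiv track=rewrite | github.com/BrianLusina/PythonSnips | algorithms/counting/rank_teams_by_votes/__init__.py | rank_teams_counting
-- ===== SOURCE A (Python) =====
-- from typing import DefaultDict, List
--
-- def rank_teams_counting(votes: List[str]) -> str:
--     counts: List[List[int | str]] = [[0] * 27 for _ in range(26)]
--
--     for t in range(26):
--         counts[t][26] = chr(ord("A") + t)
--
--     for i in range(len(votes)):
--         for j, c in enumerate(votes[i]):
--             counts[ord(c) - ord("A")][j] -= 1
--
--     counts.sort()
--
--     res = ""
--
--     for i in range(len(votes[0])):
--         res += counts[i][26]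
--
--     return res
-- ===== SOURCE B (Python) =====
-- ALPHABET = "ABCDEFGHIJKLMNOPQRSTUVWXYZ"
--
--
-- def rank_teams_counting(votes):
--     # LSD radix ranking: start from the alphabetical order and make one stable
--     # sorting pass per ballot position, from the last position back to the first,
--     # computing each position's tallies on the fly; stability makes the final
--     # order lexicographic in (votes at position 0, 1, ..., 25, letter).
--     n = len(votes[0])
--     teams = list(ALPHABET)
--     for j in range(25, -1, -1):
--         teams.sort(key=lambda t: -sum(
--             1 for v in votes if j < len(v) and ALPHABET[ord(v[j]) - 65] == t))
--     return "".join(teams[:n])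
-- ===== Notes on version B (the rewrite author's own statement) =====
-- stated objective: alternative
-- what changed: Replaces A's 26x27 negated count matrix (letter-initialisation loop, in-place decrements, one lexicographic sort of whole rows) by an LSD radix ranking: 26 stable sorting passes over the team list, one per ballot position from last to first, each keyed by that position's vote tally computed on the fly, with no count matrix built.
import Mathlib
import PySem

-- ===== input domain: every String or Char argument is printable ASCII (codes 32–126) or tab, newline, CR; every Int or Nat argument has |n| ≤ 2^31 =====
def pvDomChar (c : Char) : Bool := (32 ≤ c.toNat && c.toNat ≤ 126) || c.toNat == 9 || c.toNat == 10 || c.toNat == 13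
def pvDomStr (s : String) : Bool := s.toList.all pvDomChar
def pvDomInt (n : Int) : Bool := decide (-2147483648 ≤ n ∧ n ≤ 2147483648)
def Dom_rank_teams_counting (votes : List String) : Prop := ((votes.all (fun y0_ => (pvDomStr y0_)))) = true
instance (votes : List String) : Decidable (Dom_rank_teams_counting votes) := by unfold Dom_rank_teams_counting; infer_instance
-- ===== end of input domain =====

-- B replaces A's 26x27 negated count matrix and single lexicographic row sort by an LSD
-- radix ranking: 26 stable sorting passes over the team list, one per ballot position from
-- last to first, each keyed by that position's tally computed on the fly (no count matrix).

-- ===== PORT A =====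
-- Python's `counts[r][j] -= 1` where r = ord(c)-ord('A') may be negative (Python wraps negative
-- indexes); pyIdx? implements that rule exactly; `none` is Python's IndexError (outside Pre_),
-- left as a no-op here.  j = 26 would hit the letter slot (a str, Python TypeError — outside
-- Pre_); in this row model List.modify at 26 is a no-op.
def pvSetAt (cs : List (List Int × Char)) (r : Int) (j : Int) : List (List Int × Char) :=
  match PySem.List.pyIdx? cs.length r with
  | some t => cs.modify t (fun row => (row.1.modify j.toNat (· - 1), row.2))
  | none => cs

-- A's row `[0]*26 ++ [letter]` (ints at 0..25, a one-char str at 26) is modelled as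
-- (List Int × Char); Python's row comparison in counts.sort() — the 26 ints, then the letter —
-- is exactly the lexicographic order `toLex` on this pair.
def rank_teams_counting (votes : List String) : String :=
  let counts0 : List (List Int × Char) :=
    (PySem.List.pyRange 0 26 1).map (fun _ => (List.replicate 26 (0 : Int), ' '))
  -- for t in range(26): counts[t][26] = chr(ord("A") + t)
  let counts1 : List (List Int × Char) :=
    (PySem.List.pyRange 0 26 1).foldl
      (fun cs t => cs.modify t.toNat (fun row => (row.1, Char.ofNat (65 + t.toNat)))) counts0
  -- for i in range(len(votes)): for j, c in enumerate(votes[i]): counts[ord(c)-ord("A")][j] -= 1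
  let counts2 : List (List Int × Char) :=
    votes.foldl (fun cs v =>
      (PySem.List.enumerate v.toList 0).foldl
        (fun cs p => pvSetAt cs ((p.2.toNat : Int) - 65) p.1) cs) counts1
  let sortedCounts := PySem.List.sorted counts2 (fun r => toLex r)   -- counts.sort()
  -- for i in range(len(votes[0])): res += counts[i][26]
  -- (len(votes[0]) raises IndexError on empty votes — outside Pre_; getD gives "")
  let res := (PySem.List.pyRange 0 (PySem.Str.len (votes.getD 0 "")) 1).foldl
      (fun res i => res ++ [(sortedCounts.getD i.toNat ([], ' ')).2]) ([] : List Char)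
  String.ofList res

-- ===== PORT B =====
-- module constant: ALPHABET = "ABCDEFGHIJKLMNOPQRSTUVWXYZ"
def pvAlphabet : List Char := "ABCDEFGHIJKLMNOPQRSTUVWXYZ".toList

-- `teams = list(ALPHABET)`, then 26 in-place stable sorts (PySem.List.sorted is Python's stable
-- sort), one per position j = 25 .. 0; the key tallies position j on the fly:
-- `-sum(1 for v in votes if j < len(v) and ALPHABET[ord(v[j]) - 65] == t)`.
-- `v[j]` is guarded by `j < len(v)` (short-circuit `and`), so the plain index is `getD`;
-- `ALPHABET[ord(v[j]) - 65]` uses Python's negative-index wraparound: pyGet? is exact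
-- (none = IndexError, outside Pre_; the `.getD 'A'` default is never consulted inside Pre_).
def rank_teams_counting_alt (votes : List String) : String :=
  let n := (votes.getD 0 "").toList.length   -- len(votes[0]); IndexError on [] — outside Pre_
  let teams := (PySem.List.pyRange 25 (-1) (-1)).foldl
      (fun ts j => PySem.List.sorted ts (fun t =>
        -(votes.foldl (fun s v =>
            if j < (v.toList.length : Int) ∧
               (PySem.List.pyGet? pvAlphabet (((v.toList.getD j.toNat ' ').toNat : Int) - 65)).getD 'A' = t
            then s + 1 else s) (0 : Int)))) pvAlphabet
  String.ofList (teams.take n)   -- "".join(teams[:n]) (a slice clamps, exactly List.take)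

-- ===== PRECONDITION & SPEC =====
-- Pre_ is exactly where the Python A returns normally: A raises IndexError on [] and on any
-- character with code outside 39..90 (ord(c)-65 then falls outside the wrapped index range
-- -26..25 of the 26-row matrix), and TypeError/IndexError on any vote longer than 26 (position
-- 26 holds the row's letter string).
def Pre_rank_teams_counting (votes : List String) : Prop :=
  votes ≠ [] ∧
  (votes.all (fun v => v.toList.all (fun c => 39 ≤ c.toNat && c.toNat ≤ 90))) = true ∧
  (votes.all (fun v => decide (v.toList.length ≤ 26))) = true
instance (votes : List String) : Decidable (Pre_rank_teams_counting votes) := by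
  unfold Pre_rank_teams_counting; infer_instance

def pvWitness_rank_teams_counting : List String := ["ABC", "BCA"]

def Spec_rank_teams_counting (votes : List String) (out : String) : Prop := out = rank_teams_counting_alt votes
instance (votes : List String) (out : String) : Decidable (Spec_rank_teams_counting votes out) := by unfold Spec_rank_teams_counting; infer_instance

-- ===== CLAIM (what is proved, stated in full; the proofs are below) =====
def Claim_equal_rank_teams_counting : Prop := ∀ (votes : List String), Dom_rank_teams_counting votes → Pre_rank_teams_counting votes → Spec_rank_teams_counting votes (rank_teams_counting votes)


-- ===== LEMMAS AND PROOFS =====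

-- The letter of matrix row t.
def pvLetter (t : Nat) : Char := Char.ofNat (65 + t)

-- The matrix row a character lands in (Python's wrapped index (ord c - 65) into 26 rows).
def pvIdx (c : Char) : Nat := if 65 ≤ c.toNat then c.toNat - 65 else c.toNat - 39

-- The letter B credits a character to: ALPHABET[ord(c) - 65] (negative-index wraparound).
def pvW (c : Char) : Char :=
  (PySem.List.pyGet? pvAlphabet ((c.toNat : Int) - 65)).getD 'A'

-- All (position, char) pairs of all votes, flattened.
def pvPairs (votes : List String) : List (Int × Char) :=
  votes.flatMap (fun v => PySem.List.enumerate v.toList 0)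

-- number of votes putting a character of row t at position j
def pvCnt (votes : List String) (t j : Nat) : Int :=
  ((pvPairs votes).countP (fun p => decide (p.1 = (j : Int)) && decide (pvIdx p.2 = t)) : Int)

-- B's sort key at position j (the port's tally fold, written as a countP)
def pvSc (votes : List String) (j : Int) (t : Char) : Int :=
  -((votes.countP (fun v => decide (j < (v.toList.length : Int)) &&
      decide (pvW (v.toList.getD j.toNat ' ') = t))) : Int)

-- the composite strict order the radix passes j, j+1, …, 25 (then the letter) establish
def pvKey (votes : List String) (k : Nat) (t : Char) : Lex (List Int × Char) :=
  toLex ((List.range' k (26 - k)).map (fun i : Nat => pvSc votes (i : Int) t), t)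

-- A's matrix as a function of the count entry g j t (row t, column j).
def pvM (g : Nat → Nat → Int) : List (List Int × Char) :=
  (List.range 26).map (fun t => ((List.range 26).map (fun j => g j t), pvLetter t))

-- row t of the fully-counted matrix
def pvRow (votes : List String) (t : Nat) : List Int × Char :=
  ((List.range 26).map (fun j => -(pvCnt votes t j)), pvLetter t)

lemma pvLetter_toNat (t : Nat) (h : t < 26) : (pvLetter t).toNat = 65 + t := by
  rw [pvLetter, Char.toNat_ofNat, if_pos (Or.inl (by omega))]

lemma pvLetter_inj (t t' : Nat) (ht : t < 26) (ht' : t' < 26)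
    (h : pvLetter t = pvLetter t') : t = t' := by
  have h1 := pvLetter_toNat t ht
  have h2 := pvLetter_toNat t' ht'
  rw [h] at h1; omega

lemma pvAlphabet_eq : pvAlphabet = (List.range 26).map pvLetter := by decide

lemma pvIdx_lt (c : Char) (hc : 39 ≤ c.toNat ∧ c.toNat ≤ 90) : pvIdx c < 26 := by
  unfold pvIdx; split_ifs <;> omega

lemma pvPyIdx_eq (c : Char) (hc : 39 ≤ c.toNat ∧ c.toNat ≤ 90) :
    PySem.List.pyIdx? 26 ((c.toNat : Int) - 65) = some (pvIdx c) := by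
  simp only [PySem.List.pyIdx?, pvIdx]
  by_cases h : 65 ≤ c.toNat
  · rw [if_pos (by omega), if_pos (by omega), if_pos h]
    congr 1; omega
  · rw [if_neg (by omega), if_pos (by omega), if_neg h]
    congr 1; omega

-- B's credit map agrees with A's wrapped row index on Pre_'s character range
lemma pvW_eq (c : Char) (hc : 39 ≤ c.toNat ∧ c.toNat ≤ 90) : pvW c = pvLetter (pvIdx c) := by
  have h26 : pvAlphabet.length = 26 := by decide
  have hidx : PySem.List.pyIdx? pvAlphabet.length ((c.toNat : Int) - 65) = some (pvIdx c) := by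
    rw [h26]; exact pvPyIdx_eq c hc
  have hlt := pvIdx_lt c hc
  have hget : pvAlphabet[pvIdx c]? = some (pvLetter (pvIdx c)) := by
    rw [pvAlphabet_eq, List.getElem?_eq_getElem (by simpa using hlt)]
    simp
  simp only [pvW, PySem.List.pyGet?, hidx, Option.bind_some, hget]
  rfl
lemma pvCounts1_eq : ((PySem.List.pyRange 0 26 1).foldl
    (fun cs t => cs.modify t.toNat (fun row => (row.1, Char.ofNat (65 + t.toNat))))
    ((PySem.List.pyRange 0 26 1).map (fun _ => (List.replicate 26 (0 : Int), ' '))))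
    = pvM (fun _ _ => 0) := by
  decide

-- one matrix update on pvM
lemma pvSetAt_M (g : Nat → Nat → Int) (j : Int) (c : Char)
    (hj : 0 ≤ j) (hc : 39 ≤ c.toNat ∧ c.toNat ≤ 90) :
    pvSetAt (pvM g) ((c.toNat : Int) - 65) j
      = pvM (fun j' t => g j' t - if t = pvIdx c ∧ (j' : Int) = j then 1 else 0) := by
  have hlen : (pvM g).length = 26 := by simp [pvM]
  have hidx : PySem.List.pyIdx? (pvM g).length ((c.toNat : Int) - 65) = some (pvIdx c) := by
    rw [hlen]; exact pvPyIdx_eq c hc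
  simp only [pvSetAt, hidx]
  apply List.ext_getElem
  · simp [pvM]
  · intro t h1 h2
    have ht : t < 26 := by simpa [pvM] using h2
    rw [List.getElem_modify]
    by_cases hcase : pvIdx c = t
    · subst hcase
      simp only [pvM, List.getElem_map, List.getElem_range, true_and, if_true]
      refine Prod.ext ?_ rfl
      apply List.ext_getElem
      · simp
      · intro j' hj1 hj2
        simp only [List.getElem_modify, List.getElem_map, List.getElem_range]
        by_cases hjj : j.toNat = j'
        · rw [if_pos hjj, if_pos (by omega)]
        · rw [if_neg hjj, if_neg (by intro h; omega)]
          ring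
    · simp only [pvM, List.getElem_map, List.getElem_range]
      rw [if_neg hcase]
      refine Prod.ext ?_ rfl
      apply List.ext_getElem
      · simp
      · intro j' hj1 hj2
        simp only [List.getElem_map, List.getElem_range]
        rw [if_neg (by rintro ⟨h, -⟩; exact hcase h.symm)]
        ring

lemma pvA_fold (ps : List (Int × Char)) (g : Nat → Nat → Int)
    (hps : ∀ p ∈ ps, 0 ≤ p.1 ∧ 39 ≤ p.2.toNat ∧ p.2.toNat ≤ 90) :
    ps.foldl (fun cs p => pvSetAt cs ((p.2.toNat : Int) - 65) p.1) (pvM g)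
      = pvM (fun j t => g j t
          - (ps.countP (fun p => decide (p.1 = (j : Int)) && decide (pvIdx p.2 = t)) : Int)) := by
  induction ps generalizing g with
  | nil => simp
  | cons p ps ih =>
    obtain ⟨j, c⟩ := p
    have hp := hps (j, c) (List.mem_cons_self)
    simp only [List.foldl_cons]
    rw [pvSetAt_M g j c hp.1 ⟨hp.2.1, hp.2.2⟩,
        ih _ (fun q hq => hps q (List.mem_cons_of_mem _ hq))]
    congr 1
    funext j' t
    rw [List.countP_cons]
    by_cases hcc : t = pvIdx c ∧ (j' : Int) = j
    · rw [if_pos hcc, if_pos (by simp [hcc.1, hcc.2])]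
      push_cast; ring
    · rw [if_neg hcc, if_neg (by simp only [Bool.and_eq_true, decide_eq_true_eq]; tauto)]
      push_cast; ring

-- counting one position j in one enumerated vote
lemma pvCnt_enum (q : Char → Bool) (l : List Char) : ∀ (s j : Nat),
    (PySem.List.enumerate l (s : Int)).countP
        (fun p => decide (p.1 = (j : Int)) && q p.2)
      = if s ≤ j ∧ j - s < l.length ∧ q (l.getD (j - s) ' ') then 1 else 0 := by
  induction l with
  | nil => intro s j; simp [PySem.List.enumerate_nil]
  | cons c t ih =>
    intro s j
    rw [PySem.List.enumerate_cons, List.countP_cons]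
    have hcast : ((s : Int) + 1) = ((s + 1 : Nat) : Int) := by push_cast; ring
    rw [hcast, ih (s + 1) j]
    by_cases hsj : s = j
    · subst hsj
      rw [if_neg (by omega)]
      by_cases hq : q c = true <;> simp [hq]
    · have hd : (decide ((s : Int) = (j : Int)) && q c) = false := by
        simp; intro h; exfalso; exact hsj (by exact_mod_cast h)
      rw [hd]
      simp only [Bool.false_eq_true, if_false, add_zero]
      by_cases hs : s ≤ j
      · have hsub : j - s = (j - (s + 1)) + 1 := by omega
        rw [hsub, List.getD_cons_succ]
        refine if_congr ?_ rfl rfl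
        constructor
        · rintro ⟨-, h2, h3⟩; exact ⟨hs, by simp; omega, h3⟩
        · rintro ⟨-, h2, h3⟩; exact ⟨by omega, by simp at h2; omega, h3⟩
      · rw [if_neg (by omega), if_neg (by omega)]

-- B's tally equals (minus) A's matrix count, letter by letter
lemma pvCnt_bridge (votes : List String)
    (hch : ∀ v ∈ votes, ∀ c ∈ v.toList, 39 ≤ c.toNat ∧ c.toNat ≤ 90)
    (t j : Nat) (ht : t < 26) :
    pvSc votes (j : Int) (pvLetter t) = -(pvCnt votes t j) := by
  unfold pvSc pvCnt pvPairs
  have key : ∀ (ws : List String), (∀ v ∈ ws, ∀ c ∈ v.toList, 39 ≤ c.toNat ∧ c.toNat ≤ 90) →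
      ws.countP (fun v => decide ((j : Int) < (v.toList.length : Int)) &&
          decide (pvW (v.toList.getD (j : Int).toNat ' ') = pvLetter t))
        = (ws.flatMap (fun v => PySem.List.enumerate v.toList 0)).countP
            (fun p => decide (p.1 = (j : Int)) && decide (pvIdx p.2 = t)) := by
    intro ws hws
    induction ws with
    | nil => simp
    | cons v vs ih =>
      rw [List.flatMap_cons, List.countP_append, List.countP_cons,
          ← ih (fun w hw => hws w (List.mem_cons_of_mem _ hw))]
      have henum := pvCnt_enum (fun c => decide (pvIdx c = t)) v.toList 0 j
      have hvhead : (decide ((j : Int) < (v.toList.length : Int)) &&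
          decide (pvW (v.toList.getD (j : Int).toNat ' ') = pvLetter t)) = true ↔
          (0 ≤ j ∧ j - 0 < v.toList.length ∧
            decide (pvIdx (v.toList.getD (j - 0) ' ') = t) = true) := by
        simp only [Nat.sub_zero, Int.toNat_natCast, Bool.and_eq_true, decide_eq_true_eq]
        by_cases hj : j < v.toList.length
        · have hcm : v.toList.getD j ' ' ∈ v.toList := by
            rw [List.getD_eq_getElem?_getD, List.getElem?_eq_getElem hj]
            exact List.getElem_mem hj
          have hc := hws v List.mem_cons_self _ hcm
          rw [pvW_eq _ hc]
          constructor
          · rintro ⟨-, h2⟩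
            exact ⟨by omega, hj, pvLetter_inj _ _ (pvIdx_lt _ hc) ht h2⟩
          · rintro ⟨-, -, h3⟩
            exact ⟨by exact_mod_cast hj, by rw [h3]⟩
        · constructor
          · rintro ⟨h1, -⟩; exfalso; exact hj (by exact_mod_cast h1)
          · rintro ⟨-, h2, -⟩; exact absurd h2 hj
      have hzero : ((0 : Nat) : Int) = (0 : Int) := rfl
      rw [hzero] at henum
      rw [henum, if_congr hvhead rfl rfl]
      omega
  rw [key votes hch]

-- stability of Python's sort: a pass keyed by f refines any strict order g already present
lemma pvInsertBy_pairwise {α κ : Type} [LinearOrder κ] (f : α → Int) (g : α → κ)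
    (x : α) (ys : List α)
    (hys : ys.Pairwise (fun a b => f a < f b ∨ (f a = f b ∧ g a < g b)))
    (hg : ∀ y ∈ ys, g y < g x) :
    (PySem.List.insertBy (fun a b => decide (f a < f b)) x ys).Pairwise
      (fun a b => f a < f b ∨ (f a = f b ∧ g a < g b)) := by
  induction ys with
  | nil => simp [PySem.List.insertBy]
  | cons y t ih =>
    rw [PySem.List.insertBy]
    by_cases hfy : f x < f y
    · rw [if_pos (by simp [hfy])]
      refine List.Pairwise.cons ?_ hys
      intro z hz
      rcases List.mem_cons.mp hz with rfl | hz
      · exact Or.inl hfy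
      · rcases List.rel_of_pairwise_cons hys hz with h | ⟨h, -⟩
        · exact Or.inl (lt_trans hfy h)
        · exact Or.inl (h ▸ hfy)
    · rw [if_neg (by simp [hfy])]
      have hyt := List.pairwise_cons.mp hys
      refine List.Pairwise.cons ?_ (ih hyt.2 (fun z hz => hg z (List.mem_cons_of_mem _ hz)))
      intro z hz
      rcases (PySem.List.mem_insertBy _ x z t).mp hz with rfl | hz
      · rcases lt_or_eq_of_le (not_lt.mp hfy) with h | h
        · exact Or.inl h
        · exact Or.inr ⟨h, hg y List.mem_cons_self⟩
      · exact hyt.1 z hz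

lemma pvSorted_pairwise_stable {α κ : Type} [LinearOrder κ] (f : α → Int) (g : α → κ)
    (xs : List α) (h : xs.Pairwise (fun a b => g a < g b)) :
    (PySem.List.sorted xs f).Pairwise
      (fun a b => f a < f b ∨ (f a = f b ∧ g a < g b)) := by
  rw [PySem.List.sorted_eq_foldl_insertBy]
  have aux : ∀ (l acc : List α), l.Pairwise (fun a b => g a < g b) →
      acc.Pairwise (fun a b => f a < f b ∨ (f a = f b ∧ g a < g b)) →
      (∀ y ∈ acc, ∀ z ∈ l, g y < g z) →
      (l.foldl (fun acc x => PySem.List.insertBy (fun a b => decide (f a < f b)) x acc) acc).Pairwise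
        (fun a b => f a < f b ∨ (f a = f b ∧ g a < g b)) := by
    intro l
    induction l with
    | nil => intro acc _ hacc _; simpa using hacc
    | cons x t ih =>
      intro acc hl hacc hcross
      have hlt := List.pairwise_cons.mp hl
      rw [List.foldl_cons]
      refine ih _ hlt.2
        (pvInsertBy_pairwise f g x acc hacc (fun y hy => hcross y hy x List.mem_cons_self)) ?_
      intro y hy z hz
      rcases (PySem.List.mem_insertBy _ x y acc).mp hy with rfl | hy
      · exact hlt.1 z hz
      · exact hcross y hy z (List.mem_cons_of_mem _ hz)
  exact aux xs [] h (by simp) (by simp)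

-- one radix pass strengthens the key from position k+1 to position k
lemma pvKey_step (votes : List String) (k : Nat) (hk : k < 26) (a b : Char)
    (h : pvSc votes (k : Int) a < pvSc votes (k : Int) b ∨
        (pvSc votes (k : Int) a = pvSc votes (k : Int) b ∧
         pvKey votes (k + 1) a < pvKey votes (k + 1) b)) :
    pvKey votes k a < pvKey votes k b := by
  have hr : List.range' k (26 - k) = k :: List.range' (k + 1) (26 - (k + 1)) := by
    rw [show 26 - k = (26 - (k + 1)) + 1 from by omega, List.range'_succ]
  unfold pvKey at h ⊢
  rw [hr, List.map_cons, List.map_cons, Prod.Lex.lt_iff]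
  simp only [ofLex_toLex]
  rcases h with h | ⟨heq, hlex⟩
  · exact Or.inl (List.cons_lt_cons_iff.mpr (Or.inl h))
  · rw [Prod.Lex.lt_iff] at hlex
    simp only [ofLex_toLex] at hlex
    rcases hlex with h2 | ⟨h2, h3⟩
    · exact Or.inl (List.cons_lt_cons_iff.mpr (Or.inr ⟨heq, h2⟩))
    · exact Or.inr ⟨by rw [heq, h2], h3⟩

-- the whole countdown fold: from the alphabetical order to the full composite order
lemma pvRadix (votes : List String) : ∀ (k : Nat) (ts : List Char), k ≤ 26 →
    ts.Pairwise (fun a b => pvKey votes k a < pvKey votes k b) →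
    ts.Perm pvAlphabet →
    ((PySem.List.pyRange ((k : Int) - 1) (-1) (-1)).foldl
        (fun ts j => PySem.List.sorted ts (fun t => pvSc votes j t)) ts).Pairwise
      (fun a b => pvKey votes 0 a < pvKey votes 0 b)
    ∧ ((PySem.List.pyRange ((k : Int) - 1) (-1) (-1)).foldl
        (fun ts j => PySem.List.sorted ts (fun t => pvSc votes j t)) ts).Perm pvAlphabet := by
  intro k
  induction k with
  | zero =>
    intro ts _ hpair hperm
    rw [PySem.List.pyRange_neg_one_eq_nil (by norm_num)]
    exact ⟨hpair, hperm⟩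
  | succ k ih =>
    intro ts hk hpair hperm
    have hcons : PySem.List.pyRange (((k + 1 : Nat) : Int) - 1) (-1) (-1)
        = (k : Int) :: PySem.List.pyRange ((k : Int) - 1) (-1) (-1) := by
      rw [show (((k + 1 : Nat) : Int) - 1) = (k : Int) from by push_cast; ring]
      exact PySem.List.pyRange_neg_one_cons (by omega)
    rw [hcons, List.foldl_cons]
    refine ih _ (by omega) ?_ ((PySem.List.sorted_perm ts _ false).trans hperm)
    have hst := pvSorted_pairwise_stable (fun t => pvSc votes (k : Int) t)
      (fun t => pvKey votes (k + 1) t) ts hpair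
    exact hst.imp (fun h => pvKey_step votes k (by omega) _ _ h)

lemma pvMap_getD_take {α : Type} (l : List α) (n : Nat) (d : α) (hn : n ≤ l.length) :
    (List.range n).map (fun i => l.getD i d) = l.take n := by
  apply List.ext_getElem
  · simp; omega
  · intro i h1 h2
    have hi : i < n := by simpa using h1
    simp [List.getD_eq_getElem?_getD, List.getElem?_eq_getElem (by omega : i < l.length)]

lemma pvHd_mem (votes : List String) (hne : votes ≠ []) : votes.getD 0 "" ∈ votes := by
  cases votes with
  | nil => exact absurd rfl hne
  | cons v vs => simp

lemma pvPairs_mem (votes : List String) (p : Int × Char) (hp : p ∈ pvPairs votes) :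
    ∃ v ∈ votes, ∃ (k : Nat), ∃ (h : k < v.toList.length), p = ((k : Int), v.toList[k]) := by
  simp only [pvPairs, List.mem_flatMap] at hp
  obtain ⟨v, hv, hpv⟩ := hp
  rw [PySem.List.mem_enumerate_iff] at hpv
  obtain ⟨k, hk, hpk⟩ := hpv
  exact ⟨v, hv, k, hk, by simpa using hpk⟩

theorem rank_teams_counting_spec : Claim_equal_rank_teams_counting := by
  intro votes hdom hpre
  obtain ⟨hne, hchB, hlenB⟩ := hpre
  have hch : ∀ v ∈ votes, ∀ c ∈ v.toList, 39 ≤ c.toNat ∧ c.toNat ≤ 90 := by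
    intro v hv c hc
    have := List.all_eq_true.mp (List.all_eq_true.mp hchB v hv) c hc
    simpa using this
  have hlen : ∀ v ∈ votes, v.toList.length ≤ 26 := by
    intro v hv
    simpa using List.all_eq_true.mp hlenB v hv
  clear hchB hlenB
  unfold Spec_rank_teams_counting rank_teams_counting rank_teams_counting_alt
  simp only []
  set n := (votes.getD 0 "").toList.length with hn
  have hn26 : n ≤ 26 := hlen _ (pvHd_mem votes hne)
  have hupall : ∀ p ∈ pvPairs votes, 0 ≤ p.1 ∧ 39 ≤ p.2.toNat ∧ p.2.toNat ≤ 90 := by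
    intro p hp
    obtain ⟨v, hv, k, hk, hpk⟩ := pvPairs_mem votes p hp
    subst hpk
    exact ⟨by positivity, hch v hv _ (List.getElem_mem _)⟩
  have hA : List.foldl
      (fun cs v => List.foldl (fun cs p => pvSetAt cs ((p.2.toNat : Int) - 65) p.1) cs
        (PySem.List.enumerate v.toList))
      (List.foldl (fun cs t => cs.modify t.toNat fun row => (row.1, Char.ofNat (65 + t.toNat)))
        (List.map (fun _ => (List.replicate 26 (0 : Int), ' ')) (PySem.List.pyRange 0 26))
        (PySem.List.pyRange 0 26)) votes
      = pvM (fun j t => -(pvCnt votes t j)) := by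
    rw [pvCounts1_eq, ← List.foldl_flatMap]
    rw [show List.flatMap (fun v => PySem.List.enumerate v.toList) votes = pvPairs votes from rfl]
    rw [pvA_fold (pvPairs votes) _ hupall]
    congr 1
    funext j t
    simp [pvCnt]
  -- B side: rewrite the port's tally fold into pvSc
  have hfun : (fun (ts : List Char) (j : Int) => PySem.List.sorted ts (fun t =>
        -(votes.foldl (fun s v =>
            if j < (v.toList.length : Int) ∧
               (PySem.List.pyGet? pvAlphabet (((v.toList.getD j.toNat ' ').toNat : Int) - 65)).getD 'A' = t
            then s + 1 else s) (0 : Int))))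
      = (fun ts j => PySem.List.sorted ts (fun t => pvSc votes j t)) := by
    funext ts j
    congr 1
    funext t
    have hite : (fun (s : Int) (v : String) =>
        if j < (v.toList.length : Int) ∧
           (PySem.List.pyGet? pvAlphabet (((v.toList.getD j.toNat ' ').toNat : Int) - 65)).getD 'A' = t
        then s + 1 else s)
        = (fun (s : Int) (v : String) => if (fun v => decide (j < (v.toList.length : Int)) &&
            decide (pvW (v.toList.getD j.toNat ' ') = t)) v = true then s + 1 else s) := by
      funext s v
      by_cases h1 : j < (v.toList.length : Int) <;>
        by_cases h2 : pvW (v.toList.getD j.toNat ' ') = t <;>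
        simp [h1, h2, pvW]
    rw [hite, PySem.List.foldl_count_if]
    simp [pvSc]
  rw [hfun]
  have hbase : pvAlphabet.Pairwise (fun a b => pvKey votes 26 a < pvKey votes 26 b) := by
    have halph : pvAlphabet.Pairwise (· < ·) := by decide
    refine halph.imp ?_
    intro a b hab
    unfold pvKey
    rw [Nat.sub_self, List.range'_zero, List.map_nil, Prod.Lex.lt_iff]
    simp only [ofLex_toLex]
    exact Or.inr ⟨rfl, hab⟩
  have h26 := pvRadix votes 26 pvAlphabet (le_refl 26) hbase (List.Perm.refl _)
  rw [show (((26 : Nat) : Int) - 1) = (25 : Int) from by norm_num] at h26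
  obtain ⟨hpair0, hperm⟩ := h26
  set teams := (PySem.List.pyRange 25 (-1) (-1)).foldl
      (fun ts j => PySem.List.sorted ts (fun t => pvSc votes j t)) pvAlphabet with hteams
  -- A's sorted matrix is teams's rows
  have hkeyRow : ∀ a ∈ pvAlphabet, pvKey votes 0 a = toLex (pvRow votes (a.toNat - 65)) := by
    intro a ha
    rw [pvAlphabet_eq] at ha
    obtain ⟨t, htm, rfl⟩ := List.mem_map.mp ha
    have ht : t < 26 := List.mem_range.mp htm
    have htn : (pvLetter t).toNat - 65 = t := by
      rw [pvLetter_toNat t ht]; omega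
    unfold pvKey pvRow
    rw [htn]
    refine congrArg toLex (Prod.ext ?_ rfl)
    rw [List.range_eq_range']
    simp only [Nat.sub_zero]
    apply List.map_congr_left
    intro i hi
    exact pvCnt_bridge votes hch t i ht
  have hmemA : ∀ a ∈ teams, a ∈ pvAlphabet := fun a ha => hperm.mem_iff.mp ha
  set ys := teams.map (fun c => pvRow votes (c.toNat - 65)) with hys
  have hrowM : pvM (fun j t => -(pvCnt votes t j)) = (List.range 26).map (pvRow votes) := rfl
  have hysperm : ys.Perm (pvM (fun j t => -(pvCnt votes t j))) := by
    rw [hrowM, hys]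
    refine (hperm.map _).trans ?_
    rw [pvAlphabet_eq, List.map_map]
    apply List.Perm.of_eq
    apply List.map_congr_left
    intro t htm
    have ht : t < 26 := List.mem_range.mp htm
    simp only [Function.comp_apply]
    rw [show (pvLetter t).toNat - 65 = t from by rw [pvLetter_toNat t ht]; omega]
  have hyspair : ys.Pairwise (fun a b => toLex a < toLex b) := by
    rw [hys, List.pairwise_map]
    refine hpair0.imp_of_mem ?_
    intro a b ha hb h
    rwa [hkeyRow a (hmemA a ha), hkeyRow b (hmemA b hb)] at h
  have hsorted : PySem.List.sorted (pvM (fun j t => -(pvCnt votes t j))) (fun r => toLex r)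
      = ys := PySem.List.sorted_eq_of_perm_of_pairwise_lt _ _ _ hysperm hyspair
  rw [hA, hsorted, PySem.List.foldl_append_singleton_eq_map]
  have hlen0 : PySem.Str.len (votes.getD 0 "") = (n : Int) := by
    show (((votes.getD 0 "").toList.length : Nat) : Int) = (n : Int)
    rw [← hn]
  rw [hlen0, PySem.List.pyRange_zero_natCast, List.map_map]
  have hcomp : ((fun i => ((ys.getD i.toNat ([], ' ')).2)) ∘ fun (k : Nat) => ((k : Int)))
      = (fun p => p.2) ∘ (fun (k : Nat) => ys.getD k ([], ' ')) := by
    funext k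
    simp
  rw [hcomp, ← List.map_map]
  have hyslen : n ≤ ys.length := by
    rw [hys, List.length_map, hperm.length_eq]
    simpa using hn26
  rw [pvMap_getD_take ys n ([], ' ') hyslen]
  rw [hys, ← List.map_take, List.map_map]
  apply congrArg
  conv_rhs => rw [show teams.take n = (teams.take n).map (fun c => c) from (List.map_id _).symm]
  apply List.map_congr_left
  intro a ha
  have haA : a ∈ pvAlphabet := hmemA a (List.mem_of_mem_take ha)
  rw [pvAlphabet_eq] at haA
  obtain ⟨t, htm, rfl⟩ := List.mem_map.mp haA
  have ht : t < 26 := List.mem_range.mp htm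
  simp only [Function.comp_apply, pvRow]
  rw [pvLetter_toNat t ht]
  simp only [show 65 + t - 65 = t from by omega]
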